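-- pv_equiv track=rewrite | github.com/esantix/bing-map-pull | utils.py | tiles2quad
-- ===== SOURCE A (Python) =====
-- def num2base(n, b):
--     if n == 0:
--         return [0]
--     digits = []
--     while n:
--         digits.append(str(int(n % b)))
--         n //= b
--     return ''.join(digits[::-1])
--
-- def tiles2quad(tileX, tileY):
--
--     binX = f'{tileX:b}'
--     binY = f'{tileY:b}'
--
--     # Force same binary length representation (10, 100)->(010,100)
--     num = max(len(binX), len(binY))
--     binX = f'{tileX:0{num}b}'
--     binY = f'{tileY:0{num}b}'
--
--     # Interleave binary representations
--     res = "".join(i + j for i, j in zip(binY, binX))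
--
--     quadkey = int(res, 2)  # To binary
--     quadkey = num2base(quadkey, 4)  # To base-4
--
--     return quadkey
-- ===== SOURCE B (Python) =====
-- def tiles2quad(tileX, tileY):
--     n = max(tileX.bit_length(), tileY.bit_length())
--     return ''.join(str(2 * ((tileY >> i) & 1) + ((tileX >> i) & 1))
--                    for i in range(n - 1, -1, -1))
-- ===== Notes on version B (the rewrite author's own statement) =====
-- stated objective: simpler
-- what changed: B computes each base-4 digit directly as 2*bit_i(tileY)+bit_i(tileX) from most significant bit down, instead of formatting both numbers as padded binary strings, interleaving them, re-parsing the big interleaved integer and converting it to base 4 with num2base.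
-- outside the precondition, e.g. on tiles2quad(0, 0): A returns [0], B returns ''
import Mathlib
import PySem

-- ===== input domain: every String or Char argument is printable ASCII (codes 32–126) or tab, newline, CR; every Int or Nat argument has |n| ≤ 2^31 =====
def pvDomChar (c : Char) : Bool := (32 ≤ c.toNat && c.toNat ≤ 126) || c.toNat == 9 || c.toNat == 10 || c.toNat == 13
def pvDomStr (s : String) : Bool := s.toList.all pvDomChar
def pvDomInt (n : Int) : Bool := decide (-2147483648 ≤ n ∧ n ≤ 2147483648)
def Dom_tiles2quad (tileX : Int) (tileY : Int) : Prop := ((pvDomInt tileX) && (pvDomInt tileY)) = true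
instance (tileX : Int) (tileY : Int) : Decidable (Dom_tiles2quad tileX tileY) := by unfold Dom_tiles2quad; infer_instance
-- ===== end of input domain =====

-- B computes each base-4 quadkey digit directly from one bit of tileX and one bit of tileY,
-- instead of formatting both numbers as padded binary strings, interleaving them, re-parsing
-- and re-converting to base 4 (objective: simpler).

-- ===== PORT A =====

-- left zero-padding as done by f'{x:0{w}b}' on the digit part
def pvLeftPad (w : Nat) (l : List Char) : List Char := List.replicate (w - l.length) '0' ++ l

-- f'{x:0{w}b}' (zero-padded binary format; '-' first for negatives, counted in the width)
def pvBinPad (x : Int) (w : Nat) : List Char :=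
  if x < 0 then '-' :: pvLeftPad (w - 1) (PySem.Int.toBinChars (↑x.natAbs))
  else pvLeftPad w (PySem.Int.toBinChars x)

-- int(res, 2): exact on pure '0'/'1' digit strings, the only shape `res` has under
-- Pre_tiles2quad (for negative inputs Python raises ValueError here; those are outside Pre_)
def pvParseBin (cs : List Char) : Int :=
  cs.foldl (fun a c => 2 * a + (if c = '1' then 1 else 0)) 0

-- the `while n:` loop of num2base: digits appended least-significant first
def pvNum2baseRev (n b : Nat) : List (List Char) :=
  if n = 0 ∨ b ≤ 1 then [] else PySem.Int.toChars (↑(n % b)) :: pvNum2baseRev (n / b) b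
termination_by n
decreasing_by exact Nat.div_lt_self (by omega) (by omega)

-- num2base(n, b); Python returns the LIST [0] (not a str) for n = 0 — that branch is
-- unreachable under Pre_tiles2quad, here it yields "0"; n ≥ 0 whenever called under Pre_
def pvNum2base (n : Int) (b : Nat) : String :=
  if n = 0 then "0" else String.mk (((pvNum2baseRev n.toNat b).reverse).flatten)   -- ''.join(digits[::-1])

def tiles2quad (tileX : Int) (tileY : Int) : String :=
  let binX0 := PySem.Int.toBinChars tileX            -- f'{tileX:b}'
  let binY0 := PySem.Int.toBinChars tileY            -- f'{tileY:b}'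
  let num := max binX0.length binY0.length
  let binX := pvBinPad tileX num                     -- f'{tileX:0{num}b}'
  let binY := pvBinPad tileY num                     -- f'{tileY:0{num}b}'
  let res := (binY.zip binX).flatMap (fun p => [p.1, p.2])   -- join of i+j over zip(binY, binX)
  let quadkey := pvParseBin res                      -- int(res, 2)
  pvNum2base quadkey 4                               -- num2base(quadkey, 4)

-- ===== PORT B =====

def tiles2quad_alt (tileX : Int) (tileY : Int) : String :=
  let n := max (PySem.Int.bitLength tileX) (PySem.Int.bitLength tileY)
  -- ''.join(str(2*((tileY >> i) & 1) + ((tileX >> i) & 1)) for i in range(n-1, -1, -1))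
  String.mk ((((List.range n).reverse).map (fun (i : Nat) =>
      PySem.Int.toChars (2 * PySem.Int.band (tileY >>> i) 1 + PySem.Int.band (tileX >>> i) 1))).flatten)

-- ===== PRECONDITION & SPEC =====

-- Pre_ excludes negative inputs (A raises ValueError in int(res,2), or diverges in num2base)
-- and (0,0), where A returns the Python LIST [0] — not a value of the declared str type.
def Pre_tiles2quad (tileX : Int) (tileY : Int) : Prop :=
  0 ≤ tileX ∧ 0 ≤ tileY ∧ ¬(tileX = 0 ∧ tileY = 0)
instance (tileX : Int) (tileY : Int) : Decidable (Pre_tiles2quad tileX tileY) := by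
  unfold Pre_tiles2quad; infer_instance

def pvWitness_tiles2quad : Int × Int := (3, 5)

def Spec_tiles2quad (tileX : Int) (tileY : Int) (out : String) : Prop := out = tiles2quad_alt tileX tileY
instance (tileX : Int) (tileY : Int) (out : String) : Decidable (Spec_tiles2quad tileX tileY out) := by
  unfold Spec_tiles2quad; infer_instance

-- ===== CLAIM (what is proved, stated in full; the proofs are below) =====
def Claim_equal_tiles2quad : Prop := ∀ (tileX : Int) (tileY : Int), Dom_tiles2quad tileX tileY → Pre_tiles2quad tileX tileY → Spec_tiles2quad tileX tileY (tiles2quad tileX tileY)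

-- ===== LEMMAS AND PROOFS =====

-- bit length of a natural number, as PySem computes it
def pvNbl (x : Nat) : Nat := PySem.Int.bitLength ((x : Nat) : Int)

-- fixed-width binary, most significant bit first
def pvBitsW : Nat → Nat → List Char
  | 0, _ => []
  | w + 1, x => pvBitsW w (x / 2) ++ [Nat.digitChar (x % 2)]

-- the base-4 quadkey digit built from the low bits of x and y
def pvQdig (x y : Nat) : Nat := 2 * (y % 2) + x % 2

-- n quadkey digit characters, most significant first
def pvQchars : Nat → Nat → Nat → List Char
  | 0, _, _ => []
  | n + 1, x, y => pvQchars n (x / 2) (y / 2) ++ [Nat.digitChar (pvQdig x y)]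

-- the interleaved value
def pvVq : Nat → Nat → Nat → Nat
  | 0, _, _ => 0
  | n + 1, x, y => 4 * pvVq n (x / 2) (y / 2) + pvQdig x y

-- interleaved character list (y bit first), most significant pair first
def pvInter : Nat → Nat → Nat → List Char
  | 0, _, _ => []
  | w + 1, x, y => pvInter w (x / 2) (y / 2) ++ [Nat.digitChar (y % 2), Nat.digitChar (x % 2)]

theorem pvBitsW_length (w : Nat) : ∀ x, (pvBitsW w x).length = w := by
  induction w with
  | zero => intro x; rfl
  | succ w ih => intro x; simp [pvBitsW, ih]

theorem pvBitsW_zero_cons (w : Nat) : ∀ x, x < 2 ^ w → pvBitsW (w + 1) x = '0' :: pvBitsW w x := by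
  induction w with
  | zero => intro x h; interval_cases x; rfl
  | succ w ih =>
    intro x h
    have h2 : x / 2 < 2 ^ w := by
      have : 2 ^ (w + 1) = 2 ^ w * 2 := by ring
      omega
    show pvBitsW (w + 1) (x / 2) ++ [Nat.digitChar (x % 2)] = '0' :: (pvBitsW w (x/2) ++ [Nat.digitChar (x % 2)])
    rw [ih _ h2]; rfl

theorem pvBitsW_pad (k : Nat) : ∀ w x, x < 2 ^ w →
    pvBitsW (w + k) x = List.replicate k '0' ++ pvBitsW w x := by
  induction k with
  | zero => intro w x h; simp
  | succ k ih =>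
    intro w x h
    have h' : x < 2 ^ (w + k) := lt_of_lt_of_le h (Nat.pow_le_pow_right (by norm_num) (by omega))
    have := pvBitsW_zero_cons (w + k) x h'
    calc pvBitsW (w + (k+1)) x = pvBitsW ((w + k) + 1) x := by ring_nf
      _ = '0' :: pvBitsW (w + k) x := this
      _ = '0' :: (List.replicate k '0' ++ pvBitsW w x) := by rw [ih w x h]
      _ = List.replicate (k+1) '0' ++ pvBitsW w x := by simp [List.replicate_succ]

theorem pvNbl_succ (n : Nat) (h : 0 < n) : pvNbl n = pvNbl (n / 2) + 1 :=
  PySem.Int.bitLength_natCast h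

theorem pvNbl_lt (n : Nat) : n < 2 ^ pvNbl n := by
  have := PySem.Int.lt_two_pow_bitLength (↑n : Int)
  simpa [pvNbl] using this

theorem pvNbl_le (n : Nat) (h : n ≠ 0) : 2 ^ (pvNbl n - 1) ≤ n := by
  have := PySem.Int.two_pow_bitLength_le (↑n : Int) (by exact_mod_cast h)
  simpa [pvNbl] using this

theorem pvCore (fuel : Nat) : ∀ n ds, n < 2 ^ fuel → 0 < fuel →
    Nat.toDigitsCore 2 fuel n ds = pvBitsW (max 1 (pvNbl n)) n ++ ds := by
  induction fuel with
  | zero => intro n ds _ h; omega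
  | succ fuel ih =>
    intro n ds hn _
    rw [Nat.toDigitsCore]
    by_cases h2 : n / 2 = 0
    · rw [if_pos h2]
      have : n < 2 := by omega
      interval_cases n
      · rw [show max 1 (pvNbl 0) = 1 by decide]; rfl
      · rw [show max 1 (pvNbl 1) = 1 by decide]; rfl
    · rw [if_neg h2]
      have hge : 2 ≤ n := by omega
      have hfuel : 0 < fuel := by
        by_contra hc
        have : fuel = 0 := by omega
        subst this; simp at hn; omega
      have hdiv : n / 2 < 2 ^ fuel := by
        have : 2 ^ (fuel + 1) = 2 ^ fuel * 2 := by ring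
        omega
      rw [ih (n / 2) _ hdiv hfuel]
      have hb : pvNbl (n / 2) ≥ 1 := by
        have := pvNbl_succ (n / 2) (by omega)
        omega
      have hn1 : pvNbl n = pvNbl (n / 2) + 1 := pvNbl_succ n (by omega)
      have : max 1 (pvNbl n) = pvNbl (n / 2) + 1 := by omega
      rw [this]
      have : max 1 (pvNbl (n / 2)) = pvNbl (n / 2) := by omega
      rw [this]
      show pvBitsW (pvNbl (n/2)) (n/2) ++ Nat.digitChar (n % 2) :: ds
         = (pvBitsW (pvNbl (n/2)) (n/2) ++ [Nat.digitChar (n % 2)]) ++ ds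
      simp

theorem pvToDigits_eq (x : Nat) : Nat.toDigits 2 x = pvBitsW (max 1 (pvNbl x)) x := by
  have := pvCore (x + 1) x [] (by have := Nat.lt_two_pow_self (n := x); have : (2:Nat) ^ x ≤ 2 ^ (x+1) := Nat.pow_le_pow_right (by norm_num) (by omega); omega) (by omega)
  simpa [Nat.toDigits] using this

theorem pvPad_toDigits (w x : Nat) (hx : x < 2 ^ w) (hw : 1 ≤ w) :
    pvLeftPad w (Nat.toDigits 2 x) = pvBitsW w x := by
  have hm : max 1 (pvNbl x) ≤ w := by
    rcases Nat.eq_zero_or_pos x with rfl | hpos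
    · have : pvNbl 0 = 0 := by decide
      omega
    · have h1 : 2 ^ (pvNbl x - 1) ≤ x := by
        have := PySem.Int.two_pow_bitLength_le (↑x : Int) (by exact_mod_cast Nat.pos_iff_ne_zero.mp hpos)
        simpa [pvNbl] using this
      have h2 : 2 ^ (pvNbl x - 1) < 2 ^ w := lt_of_le_of_lt h1 hx
      have h3 : pvNbl x - 1 < w := (Nat.pow_lt_pow_iff_right (by norm_num)).mp h2
      omega
  have hxm : x < 2 ^ max 1 (pvNbl x) :=
    lt_of_lt_of_le (pvNbl_lt x) (Nat.pow_le_pow_right (by norm_num) (by omega))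
  obtain ⟨k, hk⟩ : ∃ k, w = max 1 (pvNbl x) + k := ⟨w - max 1 (pvNbl x), by omega⟩
  rw [pvToDigits_eq, pvLeftPad, pvBitsW_length, hk, pvBitsW_pad k _ x hxm,
     show max 1 (pvNbl x) + k - max 1 (pvNbl x) = k by omega]

theorem pvZip_inter (w : Nat) : ∀ x y,
    ((pvBitsW w y).zip (pvBitsW w x)).flatMap (fun p => [p.1, p.2]) = pvInter w x y := by
  induction w with
  | zero => intro x y; rfl
  | succ w ih =>
    intro x y
    show ((pvBitsW w (y/2) ++ [Nat.digitChar (y % 2)]).zip (pvBitsW w (x/2) ++ [Nat.digitChar (x % 2)])).flatMap _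
        = pvInter w (x/2) (y/2) ++ [Nat.digitChar (y % 2), Nat.digitChar (x % 2)]
    rw [List.zip_append (by rw [pvBitsW_length, pvBitsW_length])]
    rw [List.flatMap_append, ih]
    rfl

theorem pvParse_foldl (w : Nat) : ∀ x y (a : Int),
    List.foldl (fun a c => 2 * a + (if c = '1' then 1 else 0)) a (pvInter w x y)
      = a * 4 ^ w + (pvVq w x y : Int) := by
  induction w with
  | zero => intro x y a; simp [pvInter, pvVq]
  | succ w ih =>
    intro x y a
    show List.foldl _ a (pvInter w (x/2) (y/2) ++ [Nat.digitChar (y % 2), Nat.digitChar (x % 2)]) = _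
    rw [List.foldl_append, ih]
    have hy := Nat.mod_two_eq_zero_or_one y
    have hx := Nat.mod_two_eq_zero_or_one x
    show 2 * (2 * (a * 4 ^ w + (pvVq w (x/2) (y/2) : Int)) + (if Nat.digitChar (y % 2) = '1' then 1 else 0))
        + (if Nat.digitChar (x % 2) = '1' then 1 else 0)
      = a * 4 ^ (w + 1) + ((4 * pvVq w (x/2) (y/2) + pvQdig x y : Nat) : Int)
    rcases hy with hy | hy <;> rcases hx with hx | hx <;>
      rw [hy, hx] <;>
      simp [Nat.digitChar, pvQdig, hy, hx] <;> push_cast <;> try ring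

theorem pvVq_lower (n : Nat) : ∀ x y : Nat, x < 2 ^ (n + 1) → y < 2 ^ (n + 1) →
    (2 ^ n ≤ x ∨ 2 ^ n ≤ y) → 4 ^ n ≤ pvVq (n + 1) x y := by
  induction n with
  | zero =>
    intro x y hx hy h
    show 1 ≤ 4 * pvVq 0 (x/2) (y/2) + pvQdig x y
    have h0 : pvVq 0 (x/2) (y/2) = 0 := rfl
    unfold pvQdig
    simp only [pow_zero] at *
    omega
  | succ n ih =>
    intro x y hx hy h
    show 4 ^ (n+1) ≤ 4 * pvVq (n+1) (x/2) (y/2) + pvQdig x y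
    have hp : 2 ^ (n+2) = 2 ^ (n+1) * 2 := by ring
    have hp1 : 2 ^ (n+1) = 2 ^ n * 2 := by ring
    have h' : 2 ^ n ≤ x / 2 ∨ 2 ^ n ≤ y / 2 := by
      rcases h with h | h
      · left; omega
      · right; omega
    have hlow := ih (x/2) (y/2) (by omega) (by omega) h'
    have h4 : (4:Nat) ^ (n+1) = 4 * 4 ^ n := by ring
    omega

theorem pvToChars4 (d : Nat) (h : d < 4) : PySem.Int.toChars (↑d) = [Nat.digitChar d] := by
  interval_cases d <;> decide

theorem pvVq_mod (n x y : Nat) : pvVq (n + 1) x y % 4 = pvQdig x y ∧ pvVq (n + 1) x y / 4 = pvVq n (x/2) (y/2) := by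
  show (4 * pvVq n (x/2) (y/2) + pvQdig x y) % 4 = _ ∧ (4 * pvVq n (x/2) (y/2) + pvQdig x y) / 4 = _
  have : pvQdig x y < 4 := by unfold pvQdig; omega
  omega

theorem pvMsd (n : Nat) : ∀ x y : Nat, x < 2 ^ n → y < 2 ^ n →
    (n = 0 ∨ 2 ^ (n - 1) ≤ x ∨ 2 ^ (n - 1) ≤ y) →
    ((pvNum2baseRev (pvVq n x y) 4).reverse).flatten = pvQchars n x y := by
  induction n with
  | zero =>
    intro x y _ _ _
    simp [pvNum2baseRev, show pvVq 0 x y = 0 from rfl, pvQchars]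
  | succ n ih =>
    intro x y hx hy htop
    have htop' : 2 ^ n ≤ x ∨ 2 ^ n ≤ y := by
      rcases htop with h | h | h
      · omega
      · left; simpa using h
      · right; simpa using h
    have hpos : 0 < pvVq (n + 1) x y := by
      have h1 := pvVq_lower n x y hx hy htop'
      have h2 : (0:Nat) < 4 ^ n := Nat.pow_pos (by norm_num)
      omega
    obtain ⟨hmod, hdiv⟩ := pvVq_mod n x y
    have hpow : 2 ^ (n+1) = 2 ^ n * 2 := by ring
    have hx2 : x / 2 < 2 ^ n := by omega
    have hy2 : y / 2 < 2 ^ n := by omega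
    have htop2 : n = 0 ∨ 2 ^ (n - 1) ≤ x / 2 ∨ 2 ^ (n - 1) ≤ y / 2 := by
      rcases Nat.eq_zero_or_pos n with rfl | hn
      · exact Or.inl rfl
      · have hsplit : 2 ^ n = 2 ^ (n - 1) * 2 := by
          conv_lhs => rw [show n = (n - 1) + 1 by omega]
          ring
        rcases htop' with h | h
        · exact Or.inr (Or.inl (by omega))
        · exact Or.inr (Or.inr (by omega))
    rw [pvNum2baseRev, if_neg (by omega), hmod, hdiv]
    simp only [List.reverse_cons, List.flatten_append]
    rw [ih (x/2) (y/2) hx2 hy2 htop2, pvToChars4 (pvQdig x y) (by unfold pvQdig; omega)]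
    rfl

theorem pvQchars_cons (n : Nat) : ∀ x y : Nat,
    pvQchars (n + 1) x y = Nat.digitChar (pvQdig (x / 2 ^ n) (y / 2 ^ n)) :: pvQchars n x y := by
  induction n with
  | zero => intro x y; simp [pvQchars]
  | succ n ih =>
    intro x y
    show pvQchars (n+1) (x/2) (y/2) ++ [Nat.digitChar (pvQdig x y)] = _
    rw [ih (x/2) (y/2)]
    have e1 : x / 2 / 2 ^ n = x / 2 ^ (n+1) := by
      rw [Nat.div_div_eq_div_mul, ← pow_succ']
    have e2 : y / 2 / 2 ^ n = y / 2 ^ (n+1) := by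
      rw [Nat.div_div_eq_div_mul, ← pow_succ']
    rw [e1, e2]
    rfl

theorem pvRangeFlat (n : Nat) : ∀ x y : Nat,
    (((List.range n).reverse).map (fun i => [Nat.digitChar (pvQdig (x / 2 ^ i) (y / 2 ^ i))])).flatten
      = pvQchars n x y := by
  induction n with
  | zero => intro x y; rfl
  | succ n ih =>
    intro x y
    rw [List.range_succ, List.reverse_append, pvQchars_cons]
    simp only [List.reverse_cons, List.reverse_nil, List.nil_append, List.cons_append,
      List.map_cons, List.flatten_cons, ih]

theorem pvAltList (x y N : Nat) :
    (((List.range N).reverse).map (fun (i : Nat) =>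
        PySem.Int.toChars (2 * PySem.Int.band ((↑y : Int) >>> i) 1 + PySem.Int.band ((↑x : Int) >>> i) 1))).flatten
      = pvQchars N x y := by
  rw [← pvRangeFlat N x y]
  congr 1
  apply List.map_congr_left
  intro i _
  rw [show ((y:Int) >>> i) = ((y >>> i : Nat) : Int) by simp [Int.natCast_shiftRight],
      show ((x:Int) >>> i) = ((x >>> i : Nat) : Int) by simp [Int.natCast_shiftRight],
      show (1:Int) = ((1:Nat):Int) from rfl]
  rw [PySem.Int.band_natCast, PySem.Int.band_natCast,
      Nat.shiftRight_eq_div_pow, Nat.shiftRight_eq_div_pow, Nat.and_one_is_mod, Nat.and_one_is_mod,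
      show (2 * ((y / 2 ^ i % 2 : Nat) : Int) + ((x / 2 ^ i % 2 : Nat) : Int))
          = ((pvQdig (x / 2 ^ i) (y / 2 ^ i) : Nat) : Int) by unfold pvQdig; push_cast; ring,
      pvToChars4 _ (by unfold pvQdig; omega)]

theorem pvAlt_eq (x y : Nat) :
    tiles2quad_alt (↑x) (↑y) = String.mk (pvQchars (max (pvNbl x) (pvNbl y)) x y) := by
  show String.mk _ = _
  rw [show PySem.Int.bitLength ↑x = pvNbl x from rfl,
      show PySem.Int.bitLength ↑y = pvNbl y from rfl]
  exact congrArg String.mk (pvAltList x y _)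

theorem pvToBinChars_natCast (x : Nat) : PySem.Int.toBinChars (↑x : Int) = Nat.toDigits 2 x := by
  simp [PySem.Int.toBinChars]

theorem pvNbl_zero_iff (z : Nat) : pvNbl z = 0 ↔ z = 0 := by
  constructor
  · intro h
    have := pvNbl_lt z
    rw [h, pow_zero] at this
    omega
  · rintro rfl; decide

theorem pvParse_inter' (w x y : Nat) : pvParseBin (pvInter w x y) = (pvVq w x y : Int) := by
  unfold pvParseBin
  rw [pvParse_foldl]
  ring

theorem pvA_eq (x y : Nat) (hnz : ¬(x = 0 ∧ y = 0)) :
    tiles2quad (↑x) (↑y) = String.mk (pvQchars (max (pvNbl x) (pvNbl y)) x y) := by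
  have hN1 : 1 ≤ max (pvNbl x) (pvNbl y) := by
    rcases Nat.eq_zero_or_pos (max (pvNbl x) (pvNbl y)) with h | h
    · exact absurd ⟨(pvNbl_zero_iff x).mp (by omega), (pvNbl_zero_iff y).mp (by omega)⟩ hnz
    · exact h
  set N := max (pvNbl x) (pvNbl y) with hNdef
  have hxN : x < 2 ^ N := lt_of_lt_of_le (pvNbl_lt x) (Nat.pow_le_pow_right (by norm_num) (by omega))
  have hyN : y < 2 ^ N := lt_of_lt_of_le (pvNbl_lt y) (Nat.pow_le_pow_right (by norm_num) (by omega))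
  have htop : 2 ^ (N - 1) ≤ x ∨ 2 ^ (N - 1) ≤ y := by
    rcases le_total (pvNbl y) (pvNbl x) with hmax | hmax
    · left
      have hNx : N = pvNbl x := by omega
      have hxne : x ≠ 0 := by
        intro h0
        have : pvNbl x = 0 := (pvNbl_zero_iff x).mpr h0
        omega
      rw [hNx]
      exact pvNbl_le x hxne
    · right
      have hNy : N = pvNbl y := by omega
      have hyne : y ≠ 0 := by
        intro h0
        have : pvNbl y = 0 := (pvNbl_zero_iff y).mpr h0
        omega
      rw [hNy]
      exact pvNbl_le y hyne
  have hV : 0 < pvVq N x y := by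
    obtain ⟨M, hM⟩ : ∃ M, N = M + 1 := ⟨N - 1, by omega⟩
    rw [hM]
    have h4 : (0:Nat) < 4 ^ M := Nat.pow_pos (by norm_num)
    have := pvVq_lower M x y (hM ▸ hxN) (hM ▸ hyN) (by rw [hM] at htop; simpa using htop)
    omega
  show pvNum2base (pvParseBin (((pvBinPad (↑y) (max (PySem.Int.toBinChars ↑x).length (PySem.Int.toBinChars ↑y).length)).zip
      (pvBinPad (↑x) (max (PySem.Int.toBinChars ↑x).length (PySem.Int.toBinChars ↑y).length))).flatMap
      (fun p => [p.1, p.2]))) 4 = String.mk (pvQchars N x y)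
  rw [pvToBinChars_natCast, pvToBinChars_natCast,
      pvToDigits_eq x, pvToDigits_eq y, pvBitsW_length, pvBitsW_length,
      show max (max 1 (pvNbl x)) (max 1 (pvNbl y)) = N by omega]
  have hpadx : pvBinPad (↑x) N = pvBitsW N x := by
    rw [pvBinPad, if_neg (by omega)]
    rw [pvToBinChars_natCast]
    exact pvPad_toDigits N x hxN hN1
  have hpady : pvBinPad (↑y) N = pvBitsW N y := by
    rw [pvBinPad, if_neg (by omega)]
    rw [pvToBinChars_natCast]
    exact pvPad_toDigits N y hyN hN1
  rw [hpadx, hpady, pvZip_inter, pvParse_inter']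
  rw [pvNum2base, if_neg (by exact_mod_cast Nat.pos_iff_ne_zero.mp hV)]
  rw [show ((pvVq N x y : Int)).toNat = pvVq N x y from Int.toNat_natCast _]
  exact congrArg String.mk (pvMsd N x y hxN hyN (Or.inr htop))


-- ===== VERDICT (by name: the statement is the Claim_ definition above) =====
theorem tiles2quad_spec : Claim_equal_tiles2quad := by
  intro tileX tileY _ hpre
  obtain ⟨hx, hy, hnz⟩ := hpre
  unfold Spec_tiles2quad
  obtain ⟨x, rfl⟩ := Int.eq_ofNat_of_zero_le hx
  obtain ⟨y, rfl⟩ := Int.eq_ofNat_of_zero_le hy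
  rw [pvA_eq x y (by simpa using hnz), pvAlt_eq x y]
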